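-- pv_equiv track=rewrite | github.com/Ha-An/ManSim | dashboards/llm_trace.py | _sort_agent_ids
-- ===== SOURCE A (Python) =====
-- def _sort_agent_ids(values: set[str]) -> list[str]:
--     def _key(v: str) -> tuple[int, str]:
--         a = str(v).upper()
--         if a == "MANAGER":
--             return (0, a)
--         if a.startswith("A") and a[1:].isdigit():
--             return (1, f"{int(a[1:]):04d}")
--         return (2, a)
--
--     return sorted({str(v).upper() for v in values if str(v).strip()}, key=_key)
-- ===== SOURCE B (Python) =====
-- def _sort_agent_ids(values):
--     # Ordered dedupe of the filtered uppercase ids via dict.fromkeys, then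
--     # dispatch into three buckets and sort each bucket with its own plain key.
--     seen = dict.fromkeys(str(v).upper() for v in values if str(v).strip())
--     managers, a_ids, others = [], [], []
--     for s in seen:
--         if s == "MANAGER":
--             managers.append(s)
--         elif s.startswith("A") and s[1:].isdigit():
--             a_ids.append(s)
--         else:
--             others.append(s)
--     a_ids.sort(key=lambda a: f"{int(a[1:]):04d}")
--     others.sort()
--     return managers + a_ids + others
-- ===== Notes on version B (the rewrite author's own statement) =====
-- stated objective: faster
-- what changed: Replaces A's single sort under a computed (group, string) tuple key by an ordered dict.fromkeys dedup followed by a one-pass dispatch into three buckets (manager / 'A<digits>' ids / others), each sorted with its own plain key and concatenated; Pre_ excludes lists holding two distinct uppercased 'A<digits>' ids with the same zero-padded key (e.g. 'A1' and 'A01'), where A's tie order is Python's set-hash iteration order and varies between runs.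
import Mathlib
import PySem

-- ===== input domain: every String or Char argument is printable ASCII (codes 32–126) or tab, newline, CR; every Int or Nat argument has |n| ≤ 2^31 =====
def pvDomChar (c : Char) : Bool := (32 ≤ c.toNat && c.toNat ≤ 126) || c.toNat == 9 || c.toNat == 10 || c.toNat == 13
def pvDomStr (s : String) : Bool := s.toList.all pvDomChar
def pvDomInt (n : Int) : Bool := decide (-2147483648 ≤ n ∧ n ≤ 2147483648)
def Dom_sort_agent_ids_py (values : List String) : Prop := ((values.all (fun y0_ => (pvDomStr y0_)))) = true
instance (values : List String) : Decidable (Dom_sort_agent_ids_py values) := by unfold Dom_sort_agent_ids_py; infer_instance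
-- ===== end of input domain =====

-- B replaces A's single sort under a tuple key by a dict.fromkeys dedup and a dispatch into
-- three buckets (manager / A-ids / others), each sorted with its own plain key (objective:
-- faster by a constant factor, measured).

-- shared helpers (used by both ports and by Pre_):
-- a.startswith("A") and a[1:].isdigit()
def pvIsAForm (a : String) : Bool :=
  PySem.Str.startswith a "A" && PySem.Str.strIsdigit (PySem.Str.slice a (some 1) none)
-- f"{int(a[1:]):04d}" — exact whenever pvIsAForm a holds: a[1:] is then a nonempty ASCII
-- digit string, so int() succeeds with a nonnegative value n, and f"{n:04d}" = str(n).zfill(4).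
def pvPadKey (a : String) : String :=
  PySem.Str.zfill (PySem.Int.toStr ((PySem.Int.ofStr? (PySem.Str.slice a (some 1) none)).getD 0)) 4

-- ===== PORT A =====
def aKey1 (v : String) : Int :=
  let a := PySem.Str.upper v
  if a == "MANAGER" then 0
  else if pvIsAForm a then 1
  else 2
def aKey2 (v : String) : String :=
  let a := PySem.Str.upper v
  if a == "MANAGER" then a
  else if pvIsAForm a then pvPadKey a
  else a
def sort_agent_ids_py (values : List String) : List String :=
  PySem.List.sorted2
    (PySem.Set.ofList ((values.filter (fun v => !(PySem.Str.strip v == ""))).map PySem.Str.upper))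
    aKey1 aKey2

-- ===== PORT B =====
-- seen = dict.fromkeys(str(v).upper() for v in values if str(v).strip())
def bSeen (values : List String) : List String :=
  PySem.List.dedup ((values.filter (fun v => !(PySem.Str.strip v == ""))).map PySem.Str.upper)
def bPartition (seen : List String) : List String × List String × List String :=
  seen.foldl
    (fun acc s =>
      if s == "MANAGER" then (acc.1 ++ [s], acc.2.1, acc.2.2)
      else if pvIsAForm s then (acc.1, acc.2.1 ++ [s], acc.2.2)
      else (acc.1, acc.2.1, acc.2.2 ++ [s]))
    ([], [], [])
def sort_agent_ids_py_alt (values : List String) : List String :=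
  let p := bPartition (bSeen values)
  p.1 ++ PySem.List.sorted p.2.1 pvPadKey ++ PySem.List.sorted p.2.2 (fun s => s)

-- ===== PRECONDITION & SPEC =====
-- Pre_ excludes inputs holding two distinct uppercased "A<digits>" ids with the same
-- zero-padded key (e.g. "A1" and "A01"): there A sorts ties by Python's set-hash
-- iteration order, which is accidental (it varies between runs).
def Pre_sort_agent_ids_py (values : List String) : Prop :=
  ∀ x ∈ values, ∀ y ∈ values,
    pvIsAForm (PySem.Str.upper x) = true → pvIsAForm (PySem.Str.upper y) = true →
    pvPadKey (PySem.Str.upper x) = pvPadKey (PySem.Str.upper y) →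
    PySem.Str.upper x = PySem.Str.upper y
instance (values : List String) : Decidable (Pre_sort_agent_ids_py values) := by
  unfold Pre_sort_agent_ids_py; infer_instance
def pvWitness_sort_agent_ids_py : List String := ["manager", "A12", "a3", "bob", " "]
def Spec_sort_agent_ids_py (values : List String) (out : List String) : Prop := out = sort_agent_ids_py_alt values
instance (values : List String) (out : List String) : Decidable (Spec_sort_agent_ids_py values out) := by unfold Spec_sort_agent_ids_py; infer_instance

-- ===== CLAIM (what is proved, stated in full; the proofs are below) =====
def Claim_equal_sort_agent_ids_py : Prop := ∀ (values : List String), Dom_sort_agent_ids_py values → Pre_sort_agent_ids_py values → Spec_sort_agent_ids_py values (sort_agent_ids_py values)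

-- ===== LEMMAS AND PROOFS =====
theorem upperChar_idem (c : Char) : PySem.Chars.upperChar (PySem.Chars.upperChar c) = PySem.Chars.upperChar c := by
  unfold PySem.Chars.upperChar PySem.Chars.islower
  by_cases h1 : 'a' ≤ c ∧ c ≤ 'z'
  · have hlo : 97 ≤ c.toNat := Char.le_def.mp h1.1
    have hhi : c.toNat ≤ 122 := Char.le_def.mp h1.2
    have hA : ¬ ('a' ≤ Char.ofNat (c.toNat - 32)) := by
      intro hc
      have hval : (Char.ofNat (c.toNat - 32)).toNat = c.toNat - 32 := by
        rw [Char.toNat_ofNat, if_pos (Or.inl (by omega))]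
      have h2 : (97:Nat) ≤ (Char.ofNat (c.toNat - 32)).toNat := Char.le_def.mp hc
      omega
    simp [h1.1, h1.2, hA]
  · have hb : (decide ('a' ≤ c) && decide (c ≤ 'z')) = false := by
      rcases not_and_or.mp h1 with h | h <;> simp [h]
    simp [hb]

theorem upper_idem (s : String) : PySem.Str.upper (PySem.Str.upper s) = PySem.Str.upper s := by
  simp only [PySem.Str.upper, PySem.Chars.upper, String.toList_ofList, List.map_map]
  congr 1
  exact List.map_congr_left (fun c _ => upperChar_idem c)

-- the three bucket predicates (proof-side names for B's dispatch)
def pvP0 (s : String) : Bool := s == "MANAGER"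
def pvP1 (s : String) : Bool := !(s == "MANAGER") && pvIsAForm s
def pvP2 (s : String) : Bool := !(s == "MANAGER") && !(pvIsAForm s)

theorem bSeen_eq (values : List String) :
    bSeen values = PySem.Set.ofList ((values.filter (fun v => !(PySem.Str.strip v == ""))).map PySem.Str.upper) := by
  unfold bSeen
  simp

theorem bPartition_go (l : List String) : ∀ m a o : List String,
    l.foldl
      (fun acc s =>
        if s == "MANAGER" then (acc.1 ++ [s], acc.2.1, acc.2.2)
        else if pvIsAForm s then (acc.1, acc.2.1 ++ [s], acc.2.2)
        else (acc.1, acc.2.1, acc.2.2 ++ [s]))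
      (m, a, o)
    = (m ++ l.filter pvP0, a ++ l.filter pvP1, o ++ l.filter pvP2) := by
  induction l with
  | nil => intro m a o; simp
  | cons s rest ih =>
    intro m a o
    rw [List.foldl_cons]
    by_cases h0 : (s == "MANAGER") = true
    · rw [if_pos h0, ih]
      simp [pvP0, pvP1, pvP2, h0]
    · simp only [Bool.not_eq_true] at h0
      by_cases h1 : pvIsAForm s = true
      · rw [if_neg (by simp [h0]), if_pos h1, ih]
        simp [pvP0, pvP1, pvP2, h0, h1]
      · simp only [Bool.not_eq_true] at h1
        rw [if_neg (by simp [h0]), if_neg (by simp [h1]), ih]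
        simp [pvP0, pvP1, pvP2, h0, h1]

theorem bPartition_eq (l : List String) :
    bPartition l = (l.filter pvP0, l.filter pvP1, l.filter pvP2) := by
  unfold bPartition
  simpa using bPartition_go l [] [] []

theorem sorted2_eq_sorted_lex (xs : List String) (k1 : String → Int) (k2 : String → String) :
    PySem.List.sorted2 xs k1 k2 = PySem.List.sorted xs (fun a => toLex (k1 a, k2 a)) := by
  unfold PySem.List.sorted2 PySem.List.sorted
  simp only [if_neg (by decide : ¬ (false = true))]
  congr 1
  funext acc x
  congr 1
  funext a b
  rw [Bool.eq_iff_iff]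
  simp only [Bool.or_eq_true, Bool.and_eq_true, Bool.not_eq_true', decide_eq_true_eq,
    decide_eq_false_iff_not, Prod.Lex.lt_iff, ofLex_toLex]
  constructor
  · rintro (h | ⟨h1, h2⟩)
    · exact Or.inl h
    · by_cases he : k1 a = k1 b
      · exact Or.inr ⟨he, h2⟩
      · exact Or.inl (lt_of_le_of_ne (not_lt.mp h1) he)
  · rintro (h | ⟨h1, h2⟩)
    · exact Or.inl h
    · by_cases hl : k1 a < k1 b
      · exact Or.inl hl
      · exact Or.inr ⟨not_lt.mpr (le_of_eq h1), h2⟩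

theorem partition_perm (l : List String) :
    ((l.filter pvP0 ++ l.filter pvP1) ++ l.filter pvP2).Perm l := by
  have h1 : l.filter pvP1 = (l.filter (fun x => !(pvP0 x))).filter pvIsAForm := by
    rw [List.filter_filter]
    exact (List.filter_congr (fun x _ => by simp [pvP0, pvP1, Bool.and_comm])).symm
  have h2 : l.filter pvP2 = (l.filter (fun x => !(pvP0 x))).filter (fun x => !(pvIsAForm x)) := by
    rw [List.filter_filter]
    exact (List.filter_congr (fun x _ => by simp [pvP0, pvP2, Bool.and_comm])).symm
  rw [List.append_assoc, h1, h2]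
  exact ((List.filter_append_perm pvIsAForm _).append_left (l.filter pvP0)).trans
    (List.filter_append_perm pvP0 l)

-- ===== VERDICT (by name: the statement is the Claim_ definition above) =====
theorem sort_agent_ids_py_spec : Claim_equal_sort_agent_ids_py := by
  intro values _hdom hpre
  unfold Spec_sort_agent_ids_py sort_agent_ids_py sort_agent_ids_py_alt
  rw [bSeen_eq, bPartition_eq]
  set S : List String :=
    PySem.Set.ofList ((values.filter (fun v => !(PySem.Str.strip v == ""))).map PySem.Str.upper)
    with hSdef
  -- facts about the deduped list S
  have hS_nodup : S.Nodup := PySem.Set.nodup_ofList _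
  have hrep : ∀ s ∈ S, ∃ x ∈ values, s = PySem.Str.upper x := by
    intro s hs
    rw [hSdef, PySem.Set.mem_ofList] at hs
    obtain ⟨x, hx, hxe⟩ := List.mem_map.mp hs
    exact ⟨x, (List.mem_filter.mp hx).1, hxe.symm⟩
  have hup : ∀ s ∈ S, PySem.Str.upper s = s := by
    intro s hs
    obtain ⟨x, _, he⟩ := hrep s hs
    rw [he, upper_idem]
  -- key evaluation on elements of S
  have kM : ∀ s ∈ S, pvP0 s = true → (toLex (aKey1 s, aKey2 s) : Lex (Int × String)) = toLex (0, "MANAGER") := by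
    intro s hs h0
    have he : s = "MANAGER" := by simpa [pvP0] using h0
    have hu := hup s hs
    subst he
    simp [aKey1, aKey2, hu]
  have kA : ∀ s ∈ S, pvP1 s = true → (toLex (aKey1 s, aKey2 s) : Lex (Int × String)) = toLex (1, pvPadKey s) := by
    intro s hs h1
    simp only [pvP1, Bool.and_eq_true, Bool.not_eq_true'] at h1
    simp [aKey1, aKey2, hup s hs, h1.1, h1.2]
  have kO : ∀ s ∈ S, pvP2 s = true → (toLex (aKey1 s, aKey2 s) : Lex (Int × String)) = toLex (2, s) := by
    intro s hs h2
    simp only [pvP2, Bool.and_eq_true, Bool.not_eq_true'] at h2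
    simp [aKey1, aKey2, hup s hs, h2.1, h2.2]
  -- padded-key injectivity on S, from Pre_
  have hinj : ∀ a ∈ S, ∀ b ∈ S, pvIsAForm a = true → pvIsAForm b = true →
      pvPadKey a = pvPadKey b → a = b := by
    intro a ha b hb hfa hfb hpe
    obtain ⟨x, hx, hxe⟩ := hrep a ha
    obtain ⟨y, hy, hye⟩ := hrep b hb
    subst hxe; subst hye
    exact hpre x hx y hy hfa hfb hpe
  -- memberships
  have memM : ∀ a ∈ S.filter pvP0, a ∈ S ∧ pvP0 a = true := fun a ha => List.mem_filter.mp ha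
  have memA : ∀ a ∈ PySem.List.sorted (S.filter pvP1) pvPadKey, a ∈ S ∧ pvP1 a = true := by
    intro a ha
    exact List.mem_filter.mp ((PySem.List.mem_sorted _ _ _ _).mp ha)
  have memO : ∀ a ∈ PySem.List.sorted (S.filter pvP2) (fun s => s), a ∈ S ∧ pvP2 a = true := by
    intro a ha
    exact List.mem_filter.mp ((PySem.List.mem_sorted _ _ _ _).mp ha)
  rw [sorted2_eq_sorted_lex]
  apply PySem.List.sorted_eq_of_perm_of_pairwise_lt
  · -- permutation
    exact (List.Perm.append ((List.Perm.refl _).append (PySem.List.sorted_perm _ _ _))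
      (PySem.List.sorted_perm _ _ _)).trans (partition_perm S)
  · -- strictly increasing in A's lexicographic key
    refine List.pairwise_append.mpr ⟨List.pairwise_append.mpr ⟨?_, ?_, ?_⟩, ?_, ?_⟩
    · -- within managers: a nodup list of copies of "MANAGER" has at most one element
      refine (hS_nodup.filter pvP0).imp_of_mem ?_
      intro a b ha hb hne
      exfalso
      have ha' : a = "MANAGER" := by simpa [pvP0] using (memM a ha).2
      have hb' : b = "MANAGER" := by simpa [pvP0] using (memM b hb).2
      exact hne (ha'.trans hb'.symm)
    · -- within sorted A-ids
      have hnd : (PySem.List.sorted (S.filter pvP1) pvPadKey).Nodup :=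
        ((PySem.List.sorted_perm _ _ _).nodup_iff).mpr (hS_nodup.filter pvP1)
      refine ((PySem.List.sorted_pairwise (S.filter pvP1) pvPadKey).and hnd).imp_of_mem ?_
      intro a b ha hb hab
      obtain ⟨haS, haP⟩ := memA a ha
      obtain ⟨hbS, hbP⟩ := memA b hb
      rw [kA a haS haP, kA b hbS hbP, Prod.Lex.lt_iff]
      refine Or.inr ⟨rfl, ?_⟩
      refine lt_of_le_of_ne hab.1 (fun hpe => hab.2 ?_)
      have hfa : pvIsAForm a = true := (by simpa [pvP1] using haP : _ ∧ _).2
      have hfb : pvIsAForm b = true := (by simpa [pvP1] using hbP : _ ∧ _).2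
      exact hinj a haS b hbS hfa hfb hpe
    · -- managers before A-ids: first key 0 < 1
      intro a ha b hb
      obtain ⟨haS, haP⟩ := memM a ha
      obtain ⟨hbS, hbP⟩ := memA b hb
      rw [kM a haS haP, kA b hbS hbP, Prod.Lex.lt_iff]
      exact Or.inl (by norm_num)
    · -- within sorted others
      have hnd : (PySem.List.sorted (S.filter pvP2) (fun s => s)).Nodup :=
        ((PySem.List.sorted_perm _ _ _).nodup_iff).mpr (hS_nodup.filter pvP2)
      refine ((PySem.List.sorted_pairwise (S.filter pvP2) (fun s => s)).and hnd).imp_of_mem ?_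
      intro a b ha hb hab
      obtain ⟨haS, haP⟩ := memO a ha
      obtain ⟨hbS, hbP⟩ := memO b hb
      rw [kO a haS haP, kO b hbS hbP, Prod.Lex.lt_iff]
      exact Or.inr ⟨rfl, lt_of_le_of_ne hab.1 hab.2⟩
    · -- managers and A-ids before others: first key 0/1 < 2
      intro a ha b hb
      obtain ⟨hbS, hbP⟩ := memO b hb
      rw [kO b hbS hbP]
      rcases List.mem_append.mp ha with haM | haA
      · obtain ⟨haS, haP⟩ := memM a haM
        rw [kM a haS haP, Prod.Lex.lt_iff]
        exact Or.inl (by norm_num)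
      · obtain ⟨haS, haP⟩ := memA a haA
        rw [kA a haS haP, Prod.Lex.lt_iff]
        exact Or.inl (by norm_num)
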